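-- pv_equiv track=rewrite | github.com/makinzm/atcoder_2 | python/arc173/a.py | _get_same_digits_neq_number
-- ===== SOURCE A (Python) =====
-- def _calculate_stacked_value(
--         stacked_value,
--         previous_base,
--         current_digit,
--         next_digit
--     ):
--     """自明的に 9 通りの数が選べない場合の合計数を計算する助けをする"""
--     # 次の文字が現在の文字より小さい場合
--     if next_digit != current_digit:
--         if next_digit < current_digit:
--             # [0:current_digit] \ [next_digit] の数
--             stacked_value = stacked_value + (current_digit - 1) * previous_base
--         else:
--             stacked_value = stacked_value + current_digit * previous_base
--     else:
--         # [0:current_value) の数だけ自由に動ける (next_digit == current_digit であるため)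
--         stacked_value = current_digit * previous_base
--     return stacked_value
--
-- def _get_same_digits_neq_number(x):
--     """Get the number of Neq Number that has the same digits as x and less than or equal to x"""
--     num_of_digits = len(str(x))
--
--     current_digit = x % 10
--     next_digit = (x // 10) % 10
--     # 自由に選べる場合の基数
--     previous_base = 1
--     # 自由に選べない場合の合計数 (初期値は x が選べると仮定した際の1通り)
--     stacked_value = 1
--     for i in range(num_of_digits):
--         stacked_value = _calculate_stacked_value(
--             stacked_value,
--             previous_base,
--             current_digit,
--             next_digit
--         )
--         x //= 10
--         current_digit = x % 10
--         next_digit = (x // 10) % 10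
--         previous_base *= 9
--     return stacked_value
-- ===== SOURCE B (Python) =====
-- def _get_same_digits_neq_number(x):
--     """Get the number of Neq Number that has the same digits as x and less than or equal to x"""
--     s = str(x)
--     n = len(s)
--     d = int(s[0])
--     res = (d - 1) * 9 ** (n - 1)
--     prev = d
--     for i in range(1, n):
--         d = int(s[i])
--         res += (d - (1 if prev < d else 0)) * 9 ** (n - 1 - i)
--         if d == prev:
--             # x itself is not a Neq number; nothing below this prefix qualifies further
--             return res
--         prev = d
--     return res + 1
-- ===== Notes on version B (the rewrite author's own statement) =====
-- stated objective: alternative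
-- what changed: A scans the decimal digits least-significant-first with a stacked-value/previous-base accumulator that is reset whenever two adjacent digits are equal; B scans str(x) most-significant-first, adding the count of valid smaller digits times 9**remaining at each position and returning early at the first equal adjacent pair.
-- outside the precondition, e.g. on _get_same_digits_neq_number(-7): A returns 81, B raises ValueError
import Mathlib
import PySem

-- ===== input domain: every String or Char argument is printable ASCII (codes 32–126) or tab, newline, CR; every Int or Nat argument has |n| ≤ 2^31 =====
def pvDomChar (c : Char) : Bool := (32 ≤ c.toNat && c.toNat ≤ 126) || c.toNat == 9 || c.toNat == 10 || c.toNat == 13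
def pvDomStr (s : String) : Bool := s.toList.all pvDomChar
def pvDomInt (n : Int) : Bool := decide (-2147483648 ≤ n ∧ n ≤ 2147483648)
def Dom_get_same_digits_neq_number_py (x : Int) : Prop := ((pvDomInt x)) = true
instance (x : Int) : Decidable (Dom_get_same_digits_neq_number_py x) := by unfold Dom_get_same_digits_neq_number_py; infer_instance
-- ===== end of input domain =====

-- B re-implements the Neq-number count by a most-significant-first digit scan with early return,
-- replacing A's least-significant-first accumulator with resets; same O(len(str(x))) cost ("alternative").

-- ===== PORT A =====
-- port of _calculate_stacked_value
def pvCalcStacked (stacked_value previous_base current_digit next_digit : Int) : Int :=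
  if next_digit ≠ current_digit then
    if next_digit < current_digit then
      stacked_value + (current_digit - 1) * previous_base
    else
      stacked_value + current_digit * previous_base
  else
    current_digit * previous_base

-- port of A: fold over range(num_of_digits) carrying (x, current_digit, next_digit, previous_base, stacked_value)
def get_same_digits_neq_number_py (x : Int) : Int :=
  let num_of_digits := PySem.Str.len (PySem.Int.toStr x)
  let init : Int × Int × Int × Int × Int :=
    (x, PySem.Int.mod x 10, PySem.Int.mod (PySem.Int.floordiv x 10) 10, 1, 1)
  let fin := (PySem.List.pyRange 0 num_of_digits 1).foldl
    (fun st _ =>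
      let sv := pvCalcStacked st.2.2.2.2 st.2.2.2.1 st.2.1 st.2.2.1
      let x' := PySem.Int.floordiv st.1 10
      (x', PySem.Int.mod x' 10, PySem.Int.mod (PySem.Int.floordiv x' 10) 10, st.2.2.2.1 * 9, sv))
    init
  fin.2.2.2.2

-- ===== PORT B =====
-- int(c) for a single character; none (Python: ValueError, only reachable outside Pre_) defaults to 0
def pvDigit (c : Char) : Int := (PySem.Int.ofChars? [c]).getD 0

-- the loop 'for i in range(1, n)' of B, as structural recursion on the remaining characters
-- (9 ** (n - 1 - i) is 9 ^ rest.length); early 'return res' = stopping the recursion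
def pvBLoop (res prev : Int) : List Char → Int
  | [] => res + 1
  | c :: rest =>
      let d := pvDigit c
      let res' := res + (d - (if prev < d then 1 else 0)) * 9 ^ rest.length
      if d = prev then res' else pvBLoop res' d rest

def get_same_digits_neq_number_py_alt (x : Int) : Int :=
  match (PySem.Int.toStr x).toList with
  | [] => 1  -- unreachable: str(x) is never empty
  | c :: rest =>
      let d := pvDigit c
      pvBLoop ((d - 1) * 9 ^ rest.length) d rest

-- ===== PRECONDITION & SPEC =====
-- Pre_ excludes negative x: there A still returns a value, but it is an artefact of A's
-- implementation (len(str(x)) counts the '-' sign and floor division feeds spurious digits into the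
-- scan), and B's natural algorithm raises ValueError at int('-').
def Pre_get_same_digits_neq_number_py (x : Int) : Prop := 0 ≤ x
instance (x : Int) : Decidable (Pre_get_same_digits_neq_number_py x) := by unfold Pre_get_same_digits_neq_number_py; infer_instance
def pvWitness_get_same_digits_neq_number_py : Int := 1234

def Spec_get_same_digits_neq_number_py (x : Int) (out : Int) : Prop := out = get_same_digits_neq_number_py_alt x
instance (x : Int) (out : Int) : Decidable (Spec_get_same_digits_neq_number_py x out) := by unfold Spec_get_same_digits_neq_number_py; infer_instance

-- ===== CLAIM (what is proved, stated in full; the proofs are below) =====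
def Claim_equal_get_same_digits_neq_number_py : Prop := ∀ (x : Int), Dom_get_same_digits_neq_number_py x → Pre_get_same_digits_neq_number_py x → Spec_get_same_digits_neq_number_py x (get_same_digits_neq_number_py x)

-- ===== LEMMAS AND PROOFS =====

-- the low n decimal digits of x, most significant first (digit k = x / 10^k % 10)
def pvDigits (x : Int) : Nat → List Int
  | 0 => []
  | n + 1 => (x / 10 ^ n % 10) :: pvDigits x n

-- reference scan, most significant first, on an abstract digit list
def pvG (prev : Int) : List Int → Int
  | [] => 1
  | d :: rest =>
      let t := (d - (if prev < d then 1 else 0)) * 9 ^ rest.length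
      if d = prev then t else t + pvG d rest

-- n-fold iteration of A's loop body
def pvAIter (step : Int × Int × Int × Int × Int → Int × Int × Int × Int × Int) :
    Nat → Int × Int × Int × Int × Int → Int × Int × Int × Int × Int
  | 0, st => st
  | n + 1, st => pvAIter step n (step st)

lemma pvAIter_succ_right (step) (n : Nat) (st : Int × Int × Int × Int × Int) :
    pvAIter step (n + 1) st = step (pvAIter step n st) := by
  induction n generalizing st with
  | zero => rfl
  | succ k ih => simpa [pvAIter] using ih (step st)

lemma foldl_const_eq_iter (step : Int × Int × Int × Int × Int → Int × Int × Int × Int × Int)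
    (l : List Int) (st : Int × Int × Int × Int × Int) :
    l.foldl (fun s _ => step s) st = pvAIter step l.length st := by
  induction l generalizing st with
  | nil => rfl
  | cons a t ih => simp [List.foldl, pvAIter, ih]

lemma length_pvDigits (x : Int) (n : Nat) : (pvDigits x n).length = n := by
  induction n with
  | zero => rfl
  | succ k ih => simp [pvDigits, ih]

lemma pvDigits_append (x : Int) (n : Nat) :
    pvDigits x (n + 1) = pvDigits (x / 10) n ++ [x % 10] := by
  induction n with
  | zero => simp [pvDigits]
  | succ k ih =>
      have h : x / 10 / 10 ^ k = x / 10 ^ (k + 1) := by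
        rw [Int.ediv_ediv_of_nonneg (by norm_num : (0:Int) ≤ 10), ← pow_succ']
      simp only [pvDigits, List.cons_append]
      rw [← ih]
      simp [pvDigits, h]

-- A's loop invariant: after n iterations the state is
-- (x/10^n, digit n, digit (n+1), 9^n, pvG (digit n) (low n digits MSD-first))
lemma pvA_invariant (x : Int) (n : Nat) :
    pvAIter
      (fun st =>
        let sv := pvCalcStacked st.2.2.2.2 st.2.2.2.1 st.2.1 st.2.2.1
        let x' := st.1 / 10
        (x', x' % 10, x' / 10 % 10, st.2.2.2.1 * 9, sv))
      n (x, x % 10, x / 10 % 10, 1, 1)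
    = (x / 10 ^ n, x / 10 ^ n % 10, x / 10 ^ (n + 1) % 10, 9 ^ n,
       pvG (x / 10 ^ n % 10) (pvDigits x n)) := by
  induction n with
  | zero => simp [pvAIter, pvDigits, pvG]
  | succ k ih =>
      rw [pvAIter_succ_right, ih]
      have h1 : x / 10 ^ k / 10 = x / 10 ^ (k + 1) := by
        rw [Int.ediv_ediv_of_nonneg (by positivity : (0:Int) ≤ 10 ^ k), ← pow_succ]
      have h2 : x / 10 ^ (k + 1) / 10 = x / 10 ^ (k + 2) := by
        rw [Int.ediv_ediv_of_nonneg (by positivity : (0:Int) ≤ 10 ^ (k+1)), ← pow_succ]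
      simp only [h1, h2]
      refine Prod.ext rfl (Prod.ext rfl (Prod.ext rfl (Prod.ext ?_ ?_)))
      · show (9:Int) ^ k * 9 = 9 ^ (k + 1); rw [pow_succ]
      · show pvCalcStacked (pvG (x / 10 ^ k % 10) (pvDigits x k)) (9 ^ k)
            (x / 10 ^ k % 10) (x / 10 ^ (k + 1) % 10)
          = pvG (x / 10 ^ (k + 1) % 10) (pvDigits x (k + 1))
        set cd := x / 10 ^ k % 10 with hcd
        set nd := x / 10 ^ (k + 1) % 10 with hnd
        show pvCalcStacked (pvG cd (pvDigits x k)) (9 ^ k) cd nd = pvG nd (cd :: pvDigits x k)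
        simp only [pvCalcStacked, pvG, length_pvDigits]
        by_cases h : cd = nd
        · simp [h]
        · have h' : nd ≠ cd := fun hh => h hh.symm
          simp only [if_neg h', ite_not]
          by_cases hlt : nd < cd
          · simp [if_pos hlt, if_neg h]; ring
          · simp [if_neg hlt, if_neg h]; ring

lemma pvBLoop_eq (cs : List Char) (res prev : Int) :
    pvBLoop res prev cs = res + pvG prev (cs.map pvDigit) := by
  induction cs generalizing res prev with
  | nil => simp [pvBLoop, pvG]
  | cons c t ih =>
      by_cases h : pvDigit c = prev
      · simp only [pvBLoop, pvG, List.map, List.length_map, if_pos h]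
      · simp only [pvBLoop, pvG, List.map, List.length_map, if_neg h, ih]
        ring

lemma pvDigit_digitChar (d : Nat) (hd : d < 10) : pvDigit (Nat.digitChar d) = (d : Int) := by
  interval_cases d <;> decide

-- toDigitsCore: fuel irrelevance and accumulator append
lemma toDigitsCore_fuel (f1 f2 n : Nat) (ds : List Char) (h1 : n < f1) (h2 : n < f2) :
    Nat.toDigitsCore 10 f1 n ds = Nat.toDigitsCore 10 f2 n ds := by
  induction f1 generalizing f2 n ds with
  | zero => omega
  | succ k ih =>
      obtain ⟨j, rfl⟩ : ∃ j, f2 = j + 1 := ⟨f2 - 1, by omega⟩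
      simp only [Nat.toDigitsCore]
      by_cases h : n / 10 = 0
      · simp [h]
      · have hn : 0 < n := by omega
        have hlt : n / 10 < n := Nat.div_lt_self hn (by norm_num)
        simp only [if_neg h]
        exact ih j (n / 10) _ (by omega) (by omega)

lemma toDigitsCore_acc (f n : Nat) (ds : List Char) (h : n < f) :
    Nat.toDigitsCore 10 f n ds = Nat.toDigitsCore 10 f n [] ++ ds := by
  induction f generalizing n ds with
  | zero => omega
  | succ k ih =>
      simp only [Nat.toDigitsCore]
      by_cases h : n / 10 = 0
      · simp [h]
      · have hn : 0 < n := by omega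
        have hlt : n / 10 < n := Nat.div_lt_self hn (by norm_num)
        simp only [if_neg h]
        rw [ih (n / 10) _ (by omega), ih (n / 10) [(n % 10).digitChar] (by omega),
          List.append_assoc]
        rfl

lemma toDigits_lt (n : Nat) (h : n < 10) : Nat.toDigits 10 n = [Nat.digitChar n] := by
  interval_cases n <;> decide

lemma toDigits_ge (n : Nat) (h : 10 ≤ n) :
    Nat.toDigits 10 n = Nat.toDigits 10 (n / 10) ++ [Nat.digitChar (n % 10)] := by
  have h10 : n / 10 ≠ 0 := by omega
  have hlt : n / 10 < n := Nat.div_lt_self (by omega) (by norm_num)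
  show Nat.toDigitsCore 10 (n + 1) n [] = _
  rw [Nat.toDigitsCore]
  simp only [if_neg h10]
  rw [toDigitsCore_acc n (n / 10) _ (by omega)]
  rw [toDigitsCore_fuel n (n / 10 + 1) (n / 10) [] (by omega) (by omega)]
  rfl

-- main bridge: the characters of str(m) are exactly the MSD-first digit list, with the size bounds
lemma pvToDigits_spec (m : Nat) :
    (Nat.toDigits 10 m).map pvDigit = pvDigits (m : Int) (Nat.toDigits 10 m).length
    ∧ 1 ≤ (Nat.toDigits 10 m).length
    ∧ m < 10 ^ (Nat.toDigits 10 m).length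
    ∧ (1 ≤ m → 10 ^ ((Nat.toDigits 10 m).length - 1) ≤ m) := by
  induction m using Nat.strong_induction_on with
  | _ m ih =>
    by_cases h : m < 10
    · rw [toDigits_lt m h]
      refine ⟨?_, by simp, by simpa, fun h1 => by simpa⟩
      have : (m : Int) % 10 = (m : Int) := Int.emod_eq_of_lt (by positivity) (by exact_mod_cast h)
      simp [pvDigits, pvDigit_digitChar m h, this]
    · have h : 10 ≤ m := by omega
      have hlt : m / 10 < m := Nat.div_lt_self (by omega) (by norm_num)
      obtain ⟨ihmap, ihlen, ihub, ihlb⟩ := ih (m / 10) hlt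
      have hrec := toDigits_ge m h
      have hL : (Nat.toDigits 10 m).length = (Nat.toDigits 10 (m / 10)).length + 1 := by
        rw [hrec]; simp
      have hcastdiv : ((m / 10 : Nat) : Int) = (m : Int) / 10 := Int.natCast_div m 10
      refine ⟨?_, by omega, ?_, ?_⟩
      · rw [hrec]
        simp only [List.length_append, List.length_cons, List.length_nil, Nat.zero_add]
        rw [List.map_append, pvDigits_append]
        rw [← hcastdiv, ← ihmap]
        have : pvDigit (Nat.digitChar (m % 10)) = ((m % 10 : Nat) : Int) :=
          pvDigit_digitChar (m % 10) (Nat.mod_lt _ (by norm_num))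
        simp [this]
      · rw [hL, pow_succ]
        omega
      · intro _
        rw [hL]
        have h1 : 1 ≤ m / 10 := by omega
        have h2 := ihlb h1
        have h3 : 10 ^ (Nat.toDigits 10 (m / 10)).length
            = 10 ^ ((Nat.toDigits 10 (m / 10)).length - 1) * 10 := by
          rw [← pow_succ]
          congr 1
          omega
        simp only [Nat.add_sub_cancel]
        omega

lemma pvToChars_natCast (m : Nat) : PySem.Int.toChars (m : Int) = Nat.toDigits 10 m := by
  simp [PySem.Int.toChars]

-- A's port, closed form: the invariant read off at n = number of digits
lemma pvA_closed (m : Nat) :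
    get_same_digits_neq_number_py (m : Int) =
      pvG ((m : Int) / 10 ^ (Nat.toDigits 10 m).length % 10)
        (pvDigits (m : Int) (Nat.toDigits 10 m).length) := by
  unfold get_same_digits_neq_number_py
  simp only [PySem.Int.floordiv_eq_ediv_of_pos (show (0:Int) < 10 by norm_num),
    PySem.Int.mod_eq_emod_of_pos (show (0:Int) < 10 by norm_num),
    PySem.Str.len_eq, PySem.Int.toList_toStr, pvToChars_natCast]
  rw [foldl_const_eq_iter]
  rw [show (PySem.List.pyRange 0 ((Nat.toDigits 10 m).length : Int) 1).length
        = (Nat.toDigits 10 m).length by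
      rw [PySem.List.length_pyRange_one]; simp]
  rw [pvA_invariant]

-- B's port, closed form
lemma pvB_closed (m : Nat) (c : Char) (rest : List Char)
    (hcr : Nat.toDigits 10 m = c :: rest) :
    get_same_digits_neq_number_py_alt (m : Int) =
      (pvDigit c - 1) * 9 ^ rest.length + pvG (pvDigit c) (rest.map pvDigit) := by
  unfold get_same_digits_neq_number_py_alt
  rw [PySem.Int.toList_toStr, pvToChars_natCast, hcr]
  simp only []
  rw [pvBLoop_eq]

-- ===== VERDICT (by name: the statement is the Claim_ definition above) =====
theorem get_same_digits_neq_number_py_spec : Claim_equal_get_same_digits_neq_number_py := by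
  unfold Claim_equal_get_same_digits_neq_number_py
  intro x _ hpre
  unfold Spec_get_same_digits_neq_number_py Pre_get_same_digits_neq_number_py at *
  obtain ⟨m, rfl⟩ : ∃ m : Nat, x = (m : Int) := ⟨x.toNat, (Int.toNat_of_nonneg hpre).symm⟩
  by_cases hm : m = 0
  · subst hm; decide
  · have h1m : 1 ≤ m := by omega
    obtain ⟨hmap, hlen, hub, hlb⟩ := pvToDigits_spec m
    have hlb := hlb h1m
    obtain ⟨c, rest, hcr⟩ : ∃ c rest, Nat.toDigits 10 m = c :: rest := by
      cases hnil : Nat.toDigits 10 m with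
      | nil => rw [hnil] at hlen; simp at hlen
      | cons c r => exact ⟨c, r, rfl⟩
    have hLr : (Nat.toDigits 10 m).length = rest.length + 1 := by rw [hcr]; simp
    rw [hcr] at hmap
    simp only [List.length_cons, List.map, pvDigits] at hmap
    have hc : pvDigit c = (m : Int) / 10 ^ rest.length % 10 := (List.cons_eq_cons.mp hmap).1
    have hrest : rest.map pvDigit = pvDigits (m : Int) rest.length :=
      (List.cons_eq_cons.mp hmap).2
    rw [hLr] at hub hlb
    simp only [Nat.add_sub_cancel] at hlb
    -- the quotient by 10^rest.length is a digit in [1, 9]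
    have hq1 : 1 ≤ (m : Int) / 10 ^ rest.length := by
      rw [Int.le_ediv_iff_mul_le (by positivity)]
      rw [one_mul]
      exact_mod_cast hlb
    have hq2 : (m : Int) / 10 ^ rest.length < 10 := by
      rw [Int.ediv_lt_iff_lt_mul (by positivity)]
      calc (m : Int) < 10 ^ (rest.length + 1) := by exact_mod_cast hub
        _ = 10 * 10 ^ rest.length := by rw [pow_succ]; ring
    have hmod : (m : Int) / 10 ^ rest.length % 10 = (m : Int) / 10 ^ rest.length :=
      Int.emod_eq_of_lt (by omega) hq2
    -- A's closed form at L = rest.length + 1, top digit 0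
    have hdL : (m : Int) / 10 ^ (rest.length + 1) = 0 := by
      apply Int.ediv_eq_zero_of_lt (by positivity)
      exact_mod_cast hub
    rw [pvA_closed m, hLr, hdL, pvB_closed m c rest hcr]
    simp only [pvDigits, pvG, length_pvDigits]
    rw [hc, hrest, hmod]
    have hpos : ¬ ((m : Int) / 10 ^ rest.length = 0) := by omega
    have hlt0 : (0 : Int) < (m : Int) / 10 ^ rest.length := by omega
    simp only [Int.zero_emod, if_pos hlt0, if_neg hpos]
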